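-- pv_equiv track=rewrite | github.com/Smarticus81/psurchat | backend/psur/extraction.py | _score_column
-- ===== SOURCE A (Python) =====
-- from typing import Dict, List, Any, Optional
--
-- def _score_column(col_name: str, keyword_map: Dict[str, int]) -> int:
--     """Score a column name against a keyword map. Higher = better match."""
--     col_lower = col_name.lower().strip().replace(" ", "_").replace("-", "_")
--     total = 0
--     for kw, weight in keyword_map.items():
--         if kw == col_lower:
--             return weight * 3  # Exact match bonus
--         if kw in col_lower:
--             total += weight
--     return total
-- ===== SOURCE B (Python) =====
-- def _score_column(col_name: str, keyword_map) -> int: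
--     """Score a column name against a keyword map. Higher = better match."""
--     col_lower = col_name.lower().strip().replace(" ", "_").replace("-", "_")
--     if col_lower in keyword_map:
--         return keyword_map[col_lower] * 3  # Exact match bonus
--     # Invert the substring search: instead of scanning each keyword against the
--     # name, enumerate every window of the name whose length is a keyword length
--     # once, and test keywords by set membership of their windows.
--     lengths = {len(kw) for kw in keyword_map}
--     n = len(col_lower)
--     windows = {col_lower[i:i + l] for l in lengths for i in range(n - l + 1)}
--     return sum(w for kw, w in keyword_map.items() if kw in windows)
-- ===== Notes on version B (the rewrite author's own statement) =====
-- stated objective: alternative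
-- what changed: Inverts the substring search: instead of running a per-keyword substring scan over the column name, B precomputes the set of all windows of the normalised name whose lengths occur among the keywords and tests each keyword by set membership; the exact-match early return becomes a dict lookup (valid since dict keys are unique).
import Mathlib
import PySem

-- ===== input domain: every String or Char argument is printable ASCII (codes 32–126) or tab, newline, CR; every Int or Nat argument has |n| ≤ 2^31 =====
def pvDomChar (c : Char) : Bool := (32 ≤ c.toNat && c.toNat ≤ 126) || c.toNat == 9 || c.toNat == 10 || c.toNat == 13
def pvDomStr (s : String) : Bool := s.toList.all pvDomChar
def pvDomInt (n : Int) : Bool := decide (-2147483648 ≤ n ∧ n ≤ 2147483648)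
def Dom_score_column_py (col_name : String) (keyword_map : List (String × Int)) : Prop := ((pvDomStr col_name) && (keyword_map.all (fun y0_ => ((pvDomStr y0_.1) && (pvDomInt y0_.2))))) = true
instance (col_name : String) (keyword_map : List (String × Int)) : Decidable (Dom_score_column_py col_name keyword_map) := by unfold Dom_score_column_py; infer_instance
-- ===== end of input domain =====

-- B inverts the substring search: it enumerates the windows of the normalised name whose
-- lengths occur among the keywords and tests keywords by set membership (alternative decomposition).
-- ===== PORT A =====
-- the normalised column name, shared verbatim by both Pythons
def pvColLower (col_name : String) : String :=
  PySem.Str.replace (PySem.Str.replace (PySem.Str.strip (PySem.Str.lower col_name)) " " "_") "-" "_"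

-- A's for-loop with early return, as structural recursion over the items
def scoreLoopA (col_lower : String) : List (String × Int) → Int → Int
  | [], total => total
  | (kw, weight) :: rest, total =>
      if kw == col_lower then weight * 3
      else if PySem.Str.isIn kw col_lower then scoreLoopA col_lower rest (total + weight)
      else scoreLoopA col_lower rest total

def score_column_py (col_name : String) (keyword_map : List (String × Int)) : Int :=
  scoreLoopA (pvColLower col_name) keyword_map 0

-- ===== PORT B =====
-- the window set of Source B: every slice col_lower[i:i+l] with l a keyword length
def pvWindows (col_lower : String) (keyword_map : List (String × Int)) : PySem.Set String :=
  PySem.Set.ofList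
    ((PySem.Set.ofList (keyword_map.map (fun p => PySem.Str.len p.1))).flatMap
      (fun l => (PySem.List.pyRange 0 (PySem.Str.len col_lower - l + 1) 1).map
        (fun i => PySem.Str.slice col_lower (some i) (some (i + l)))))

def score_column_py_alt (col_name : String) (keyword_map : List (String × Int)) : Int :=
  let col_lower := pvColLower col_name
  match (PySem.Dict.mk keyword_map).get? col_lower with   -- `col_lower in keyword_map` + lookup
  | some w => w * 3
  | none =>
      let windows := pvWindows col_lower keyword_map
      ((keyword_map.filter (fun p => windows.contains p.1)).map Prod.snd).sum

-- ===== PRECONDITION & SPEC =====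
def Spec_score_column_py (col_name : String) (keyword_map : List (String × Int)) (out : Int) : Prop := out = score_column_py_alt col_name keyword_map
instance (col_name : String) (keyword_map : List (String × Int)) (out : Int) : Decidable (Spec_score_column_py col_name keyword_map out) := by unfold Spec_score_column_py; infer_instance

-- ===== CLAIM (what is proved, stated in full; the proofs are below) =====
def Claim_equal_score_column_py : Prop := ∀ (col_name : String) (keyword_map : List (String × Int)), Dom_score_column_py col_name keyword_map → Spec_score_column_py col_name keyword_map (score_column_py col_name keyword_map)

-- ===== LEMMAS AND PROOFS =====
lemma scoreLoopA_eq (col : String) : ∀ (l : List (String × Int)) (total : Int),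
    scoreLoopA col l total =
      match (PySem.Dict.mk l).get? col with
      | some w => w * 3
      | none => total + ((l.filter (fun p => PySem.Str.isIn p.1 col)).map Prod.snd).sum
  | [], total => by simp [scoreLoopA, PySem.Dict.get?]
  | (kw, weight) :: rest, total => by
      rw [scoreLoopA, PySem.Dict.get?_mk_cons]
      by_cases hkw : kw == col
      · simp [hkw]
      · rw [if_neg hkw]
        by_cases hin : PySem.Str.isIn kw col = true
        · rw [if_pos hin, scoreLoopA_eq col rest (total + weight)]
          simp only [if_neg hkw]
          cases h : (PySem.Dict.mk rest).get? col with
          | some w => simp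
          | none =>
              simp only [PySem.Str.isIn] at hin
              simp [hin]; ring
        · rw [if_neg hin, scoreLoopA_eq col rest total]
          simp only [if_neg hkw]
          cases h : (PySem.Dict.mk rest).get? col with
          | some w => simp
          | none =>
              simp only [PySem.Str.isIn] at hin
              simp [hin]

-- a keyword is in Source B's window set iff it is a substring of the name
lemma mem_windows_iff (col kw : String) (km : List (String × Int))
    (hkey : PySem.Str.len kw ∈ km.map (fun p => PySem.Str.len p.1)) :
    (pvWindows col km).contains kw = PySem.Str.isIn kw col := by
  have hcs : ∀ (a b : Option Int), PySem.Chars.slice col.toList a b = PySem.List.slice col.toList a b :=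
    fun _ _ => rfl
  have hmem : kw ∈ pvWindows col km ↔ PySem.Str.isIn kw col = true := by
    unfold pvWindows
    rw [PySem.Set.mem_ofList, List.mem_flatMap]
    constructor
    · rintro ⟨l, hl, hkwmem⟩
      rw [PySem.Set.mem_ofList, List.mem_map] at hl
      obtain ⟨p, hp, rfl⟩ := hl
      rw [List.mem_map] at hkwmem
      obtain ⟨i, hi, hslice⟩ := hkwmem
      rw [PySem.List.mem_pyRange_iff_of_pos (by norm_num)] at hi
      obtain ⟨hi0, hiub, -⟩ := hi
      have hl0 : (0:Int) ≤ PySem.Str.len p.1 := by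
        rw [PySem.Str.len_eq]; exact Int.natCast_nonneg _
      rw [PySem.Str.isIn_eq, PySem.Chars.isIn_iff_infix]
      have hkl : kw.toList = PySem.Chars.slice col.toList (some i) (some (i + PySem.Str.len p.1)) := by
        rw [← PySem.Str.toList_slice, hslice]
      rw [hkl, hcs, PySem.List.slice_toNat col.toList hi0 (by omega)]
      exact (List.take_prefix _ _).isInfix.trans (List.drop_suffix _ _).isInfix
    · intro hin
      rw [PySem.Str.isIn_eq] at hin
      obtain ⟨j, hpre⟩ := (PySem.Chars.exists_prefix_drop_iff_isIn kw.toList col.toList).mpr hin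
      refine ⟨PySem.Str.len kw, (PySem.Set.mem_ofList _ _).mpr hkey, ?_⟩
      rw [List.mem_map]
      by_cases hn : kw.toList.length = 0
      · have hk0 : PySem.Str.len kw = 0 := by rw [PySem.Str.len_eq, hn]; rfl
        have hknil : kw.toList = [] := List.length_eq_zero_iff.mp hn
        refine ⟨0, ?_, ?_⟩
        · rw [PySem.List.mem_pyRange_iff_of_pos (by norm_num)]
          refine ⟨le_refl 0, ?_, one_dvd _⟩
          rw [hk0, PySem.Str.len_eq]
          have := Int.natCast_nonneg col.toList.length
          omega
        · apply String.toList_inj.mp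
          rw [PySem.Str.toList_slice, hcs,
            PySem.List.slice_toNat col.toList (le_refl 0) (by omega)]
          simp [hknil]
      · have hlen : kw.toList.length ≤ col.toList.length - j := by
          have := hpre.length_le
          simpa using this
        have hj : j + kw.toList.length ≤ col.toList.length := by omega
        refine ⟨(j : Int), ?_, ?_⟩
        · rw [PySem.List.mem_pyRange_iff_of_pos (by norm_num)]
          refine ⟨Int.natCast_nonneg j, ?_, one_dvd _⟩
          rw [PySem.Str.len_eq, PySem.Str.len_eq]
          omega
        · apply String.toList_inj.mp
          rw [PySem.Str.toList_slice, hcs,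
            PySem.List.slice_toNat col.toList (Int.natCast_nonneg j)
              (by rw [PySem.Str.len_eq]; omega)]
          have harith : ((j : Int) + PySem.Str.len kw).toNat - (j : Int).toNat = kw.toList.length := by
            rw [PySem.Str.len_eq]; omega
          rw [harith, Int.toNat_natCast]
          exact (List.prefix_iff_eq_take.mp hpre).symm
  cases hin : PySem.Str.isIn kw col with
  | true => exact List.contains_iff_mem.mpr (hmem.mpr hin)
  | false =>
      refine Bool.eq_false_iff.mpr ?_
      intro hc
      have := hmem.mp (List.contains_iff_mem.mp hc)
      rw [hin] at this
      exact Bool.false_ne_true this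

-- ===== VERDICT (by name: the statement is the Claim_ definition above) =====
theorem score_column_py_spec : Claim_equal_score_column_py := by
  intro col_name keyword_map _
  unfold Spec_score_column_py score_column_py score_column_py_alt
  rw [scoreLoopA_eq]
  cases h : (PySem.Dict.mk keyword_map).get? (pvColLower col_name) with
  | some w => simp [h]
  | none =>
      have hf : keyword_map.filter (fun p => (pvWindows (pvColLower col_name) keyword_map).contains p.1)
          = keyword_map.filter (fun p => PySem.Str.isIn p.1 (pvColLower col_name)) := by
        apply List.filter_congr
        intro p hp
        rw [mem_windows_iff]
        exact List.mem_map.mpr ⟨p, hp, rfl⟩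
      simp only [h, zero_add, hf]
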